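-- pv_equiv track=rewrite | github.com/Sciotaku/COSC1 | PracticeProblems/Practice Problems/nestedloops/3.py | check_strings
-- ===== SOURCE A (Python) =====
-- def contains_char(gstr, c):
--     for x in gstr:
--         if x == c:
--             return True
--
--     return False
--
-- def check_strings(str1, str2):
--     test1 = False
--     test2 = False
--
--     #Check if all characters in str1 are
--     #there in str2 and set test1
--     for x in str1:
--         if not contains_char(str2, x):
--             return False
--
--     test1 = True
--
--     # Check if all characters in str2 are
--     # there in str1 and set mystory2
--     for x in str2:
--         if not contains_char(str1, x):
--             return False
--
--     test2 = True
--
--     return (test1 and test2)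
-- ===== SOURCE B (Python) =====
-- def check_strings(str1, str2):
--     # Build one index: for each character, a pair of flags (in_str1, in_str2),
--     # then verify every character was seen in both strings.
--     flags = {}
--     for c in str1:
--         flags[c] = (True, False)
--     for c in str2:
--         flags[c] = (flags.get(c, (False, False))[0], True)
--     return all(v == (True, True) for v in flags.values())
-- ===== Notes on version B (the rewrite author's own statement) =====
-- stated objective: faster
-- what changed: Replaces A's nested membership rescans (each char checked by scanning the whole other string) with building a char->(seen-in-1, seen-in-2) flag dict in two flat passes and one verification pass over its values.
import Mathlib
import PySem

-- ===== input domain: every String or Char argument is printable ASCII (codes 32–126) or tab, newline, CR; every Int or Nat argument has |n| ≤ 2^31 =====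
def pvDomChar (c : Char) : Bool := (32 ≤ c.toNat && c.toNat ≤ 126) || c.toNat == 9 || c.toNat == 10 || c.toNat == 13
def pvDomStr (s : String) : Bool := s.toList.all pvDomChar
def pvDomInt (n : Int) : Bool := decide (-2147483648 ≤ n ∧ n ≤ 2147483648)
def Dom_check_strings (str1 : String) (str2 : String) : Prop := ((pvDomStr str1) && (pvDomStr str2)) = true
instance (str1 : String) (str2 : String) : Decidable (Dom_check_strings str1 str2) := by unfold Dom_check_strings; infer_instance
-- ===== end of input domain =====

-- B replaces A's nested membership rescans with a char→(seen-in-1, seen-in-2) flag dict built in two flat passes (faster).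

-- ===== PORT A =====
-- contains_char: scan gstr, return True on the first match, else False
def containsChar (gstr : List Char) (c : Char) : Bool :=
  match gstr with
  | [] => false
  | x :: rest => if x = c then true else containsChar rest c

-- the 'for x in xs: if not contains_char(other, x): return False' loop; true = fell through
def checkLoop (xs other : List Char) : Bool :=
  match xs with
  | [] => true
  | x :: rest => if !containsChar other x then false else checkLoop rest other

def check_strings (str1 : String) (str2 : String) : Bool :=
  -- first loop: early return False on a char of str1 missing from str2
  if checkLoop str1.toList str2.toList = false then false
  else
    -- test1 = True; second loop over str2
    if checkLoop str2.toList str1.toList = false then false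
    else (true && true)  -- test1 and test2

-- ===== PORT B =====
-- flags = {}; for c in str1: flags[c] = (True, False);
-- for c in str2: flags[c] = (flags.get(c, (False, False))[0], True)   (the two loop results inlined);
-- return all(v == (True, True) for v in flags.values())
def check_strings_alt (str1 : String) (str2 : String) : Bool :=
  (str2.toList.foldl (fun d c => d.insert c ((d.getD c (false, false)).1, true))
      (str1.toList.foldl (fun d c => d.insert c (true, false))
        (PySem.Dict.empty : PySem.Dict Char (Bool × Bool)))).values.all (fun v => v == (true, true))

-- ===== PRECONDITION & SPEC =====
def Spec_check_strings (str1 : String) (str2 : String) (out : Bool) : Prop := out = check_strings_alt str1 str2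
instance (str1 : String) (str2 : String) (out : Bool) : Decidable (Spec_check_strings str1 str2 out) := by unfold Spec_check_strings; infer_instance

-- ===== CLAIM (what is proved, stated in full; the proofs are below) =====
def Claim_equal_check_strings : Prop := ∀ (str1 : String) (str2 : String), Dom_check_strings str1 str2 → Spec_check_strings str1 str2 (check_strings str1 str2)

-- ===== LEMMAS AND PROOFS =====

theorem containsChar_iff (ys : List Char) (c : Char) : containsChar ys c = true ↔ c ∈ ys := by
  induction ys with
  | nil => simp [containsChar]
  | cons y ys ih =>
    simp only [containsChar]
    split_ifs with h
    · subst h; simp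
    · simp only [List.mem_cons, ih]
      constructor
      · exact Or.inr
      · rintro (h1 | h2)
        · exact absurd h1.symm h
        · exact h2

theorem checkLoop_iff (xs other : List Char) : checkLoop xs other = true ↔ ∀ x ∈ xs, x ∈ other := by
  induction xs with
  | nil => simp [checkLoop]
  | cons x xs ih =>
    simp only [checkLoop]
    by_cases h : containsChar other x = true
    · rw [if_neg (by simp [h]), ih]
      constructor
      · intro hall y hy
        rcases List.mem_cons.1 hy with rfl | hy
        · exact (containsChar_iff other y).1 h
        · exact hall y hy
      · intro hall y hy; exact hall y (List.mem_cons_of_mem _ hy)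
    · rw [if_pos (by simp [Bool.not_eq_true] at h ⊢; exact h)]
      constructor
      · intro hfalse; cases hfalse
      · intro hall
        exact absurd ((containsChar_iff other x).2 (hall x (List.mem_cons_self))) h

-- lookup after the first marking loop
theorem getD_foldl_mark1 (l : List Char) (d : PySem.Dict Char (Bool × Bool)) (c : Char) :
    (l.foldl (fun d c => d.insert c (true, false)) d).getD c (false, false)
      = if c ∈ l then (true, false) else d.getD c (false, false) := by
  induction l generalizing d with
  | nil => simp
  | cons x xs ih =>
    rw [List.foldl_cons, ih, PySem.Dict.getD_insert]
    by_cases hx : c = x <;> by_cases hm : c ∈ xs <;> simp [hx, hm]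

-- lookup after the second marking loop
theorem getD_foldl_mark2 (l : List Char) (d : PySem.Dict Char (Bool × Bool)) (c : Char) :
    (l.foldl (fun d c => d.insert c ((d.getD c (false, false)).1, true)) d).getD c (false, false)
      = if c ∈ l then ((d.getD c (false, false)).1, true) else d.getD c (false, false) := by
  induction l generalizing d with
  | nil => simp
  | cons x xs ih =>
    rw [List.foldl_cons, ih, PySem.Dict.getD_insert]
    by_cases hx : c = x <;> by_cases hm : c ∈ xs <;> simp [hx, hm]

-- the value stored for c in B's finished dict
theorem flag_value (s1 s2 : List Char) (c : Char) :
    ((s2.foldl (fun d c => d.insert c ((d.getD c (false, false)).1, true))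
        (s1.foldl (fun d c => d.insert c (true, false))
          (PySem.Dict.empty : PySem.Dict Char (Bool × Bool)))).getD c (false, false))
      = ((if c ∈ s1 then true else false), (if c ∈ s2 then true else false)) := by
  rw [getD_foldl_mark2, getD_foldl_mark1, PySem.Dict.getD_empty]
  by_cases h1 : c ∈ s1 <;> by_cases h2 : c ∈ s2 <;> simp [h1, h2]

theorem keys_nodup (s1 s2 : List Char) :
    ((s2.foldl (fun d c => d.insert c ((d.getD c (false, false)).1, true))
        (s1.foldl (fun d c => d.insert c (true, false))
          (PySem.Dict.empty : PySem.Dict Char (Bool × Bool)))).keys).Nodup := by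
  apply PySem.Dict.nodup_keys_foldl_insert
  apply PySem.Dict.nodup_keys_foldl_insert
  exact PySem.Dict.nodup_keys_empty

theorem mem_keys (s1 s2 : List Char) (c : Char) :
    c ∈ (s2.foldl (fun d c => d.insert c ((d.getD c (false, false)).1, true))
        (s1.foldl (fun d c => d.insert c (true, false))
          (PySem.Dict.empty : PySem.Dict Char (Bool × Bool)))).keys
      ↔ c ∈ s1 ∨ c ∈ s2 := by
  rw [PySem.Dict.keys_foldl_insert, PySem.Set.mem_update,
      PySem.Dict.keys_foldl_insert, PySem.Set.mem_update]
  simp [PySem.Dict.keys_empty]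

theorem alt_iff (str1 str2 : String) :
    check_strings_alt str1 str2 = true
      ↔ ∀ c : Char, (c ∈ str1.toList ∨ c ∈ str2.toList) → (c ∈ str1.toList ∧ c ∈ str2.toList) := by
  unfold check_strings_alt
  rw [PySem.Dict.values_eq_map_keys _ (keys_nodup str1.toList str2.toList) (false, false), List.all_eq_true]
  constructor
  · intro hall c hc
    have hk := (mem_keys str1.toList str2.toList c).2 hc
    have h3 := hall _ (List.mem_map.2 ⟨c, hk, rfl⟩)
    rw [flag_value] at h3
    by_cases h1 : c ∈ str1.toList <;> by_cases h2 : c ∈ str2.toList <;>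
      simp [h1, h2] at h3 ⊢
  · intro hall v hv
    rcases List.mem_map.1 hv with ⟨c, hk, rfl⟩
    have hc := hall c ((mem_keys str1.toList str2.toList c).1 hk)
    rw [flag_value, if_pos hc.1, if_pos hc.2]
    decide

theorem a_iff (str1 str2 : String) :
    check_strings str1 str2 = true
      ↔ (∀ x ∈ str1.toList, x ∈ str2.toList) ∧ (∀ x ∈ str2.toList, x ∈ str1.toList) := by
  unfold check_strings
  split_ifs with h1 h2
  · constructor
    · intro h; exact absurd h (by simp)
    · rintro ⟨ha, _⟩
      exact absurd ((checkLoop_iff _ _).2 ha) (by simp [h1])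
  · constructor
    · intro h; exact absurd h (by simp)
    · rintro ⟨_, hb⟩
      exact absurd ((checkLoop_iff _ _).2 hb) (by simp [h2])
  · rw [Bool.not_eq_false] at h1 h2
    simp only [Bool.and_self]
    constructor
    · intro _
      exact ⟨(checkLoop_iff _ _).1 h1, (checkLoop_iff _ _).1 h2⟩
    · intro _; trivial

-- ===== VERDICT (by name: the statement is the Claim_ definition above) =====
theorem check_strings_spec : Claim_equal_check_strings := by
  intro str1 str2 _
  unfold Spec_check_strings
  rw [Bool.eq_iff_iff, a_iff, alt_iff]
  constructor
  · rintro ⟨h12, h21⟩ c hc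
    rcases hc with hc | hc
    · exact ⟨hc, h12 c hc⟩
    · exact ⟨h21 c hc, hc⟩
  · intro h
    exact ⟨fun x hx => (h x (Or.inl hx)).2, fun x hx => (h x (Or.inr hx)).1⟩
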